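-- pv_equiv track=rewrite | github.com/marysiuniq/advent_of_code_2020 | 20/puzzle_20_2.py | find_monster
-- ===== SOURCE A (Python) =====
-- from copy import deepcopy
--
-- def find_monster(in_image, monster):
--     '''
--     Checks if the monster pattern is in the image. If so, replaces # with O.
--     '''
--     size_hor = len(monster[0])
--     size_ver = len(monster)
--     image_with_monsters = deepcopy(in_image)
--     def replace_hash(in_col, in_row, image):
--         image_copy = deepcopy(image)
--         for in_c in range(in_col, in_col+size_hor):
--             for in_r in range(in_row, in_row+size_ver):
--                 if monster[in_r-in_row][in_c-in_col] == '#':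
--                     image_copy[in_r][in_c] = 'O'
--         return image_copy
--     def monster_in_window(in_window, in_monster):
--         for in_c in range(len(monster[0])):
--             for in_r in range(len(monster)):
--                 if in_monster[in_r][in_c] == '#':
--                     if in_window[in_r][in_c] != in_monster[in_r][in_c]:
--                         return False
--         return True
--     for col in range(0, len(in_image[0])-size_hor+1):
--         for row in range(0, len(in_image)-size_ver+1):
--             window = [_[col:col+size_hor] for _ in in_image[row:row+size_ver]]
--             if monster_in_window(window, monster):
--                 image_with_monsters = replace_hash(col, row, image_with_monsters)
--     return image_with_monsters
-- ===== SOURCE B (Python) =====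
-- def find_monster(in_image, monster):
--     '''
--     Checks if the monster pattern is in the image. If so, replaces # with O.
--     '''
--     h = len(monster)
--     w = len(monster[0])
--     rows = len(in_image)
--     cols = len(in_image[0])
--
--     def hits(k, mrow):
--         # corners consistent with monster row k alone ('#' cells constrain, rest are wildcards)
--         req = [c for c, ch in enumerate(mrow[:w]) if ch == '#']
--         return {(r0, c0)
--                 for r0 in range(rows - h + 1)
--                 for c0 in range(cols - w + 1)
--                 if all(in_image[r0 + k][c0 + c] == '#' for c in req)}
--
--     # a corner hosts a monster iff every monster row matches there: intersect the per-row sets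
--     corners = {(r0, c0) for r0 in range(rows - h + 1) for c0 in range(cols - w + 1)}
--     for k, mrow in enumerate(monster):
--         corners &= hits(k, mrow)
--
--     offs = [(r, c) for r, mrow in enumerate(monster)
--             for c, ch in enumerate(mrow[:w]) if ch == '#']
--     marked = {(r0 + r, c0 + c) for (r0, c0) in corners for (r, c) in offs}
--
--     # rebuild the image functionally: a cell is 'O' iff some monster covers it with '#'
--     return [['O' if (i, j) in marked else cell
--              for j, cell in enumerate(row)]
--             for i, row in enumerate(in_image)]
-- ===== Notes on version B (the rewrite author's own statement) =====
-- stated objective: alternative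
-- what changed: B detects monsters row-wise — for each monster row it builds the set of top-left corners consistent with that row alone and intersects these sets across rows — then rebuilds the image functionally cell-by-cell from the set of covered coordinates, instead of A's pattern-at-a-time window scan with an in-place marking pass and a full-image deepcopy per match.
-- outside the precondition, e.g. on find_monster([['.'], ['.']], ['#', '']): A returns [['.'], ['.']], B returns [['.'], ['.']]
import Mathlib
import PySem

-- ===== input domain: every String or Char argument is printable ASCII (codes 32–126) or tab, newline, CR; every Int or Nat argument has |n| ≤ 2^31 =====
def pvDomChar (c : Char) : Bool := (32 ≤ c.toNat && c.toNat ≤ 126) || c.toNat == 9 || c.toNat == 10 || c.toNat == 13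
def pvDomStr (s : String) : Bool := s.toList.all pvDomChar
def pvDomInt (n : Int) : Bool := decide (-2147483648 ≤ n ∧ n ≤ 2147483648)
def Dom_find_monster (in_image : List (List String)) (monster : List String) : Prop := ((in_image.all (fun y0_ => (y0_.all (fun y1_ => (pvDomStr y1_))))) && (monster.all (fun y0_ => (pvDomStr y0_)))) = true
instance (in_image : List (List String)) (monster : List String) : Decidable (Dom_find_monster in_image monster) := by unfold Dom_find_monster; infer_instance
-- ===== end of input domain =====

-- B re-implements find_monster by a different strategy: for each monster ROW it computes the set of top-left
-- corners consistent with that row alone and INTERSECTS these sets over the rows; it then rebuilds the image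
-- functionally, cell by cell, from the set of covered coordinates — instead of A's pattern-at-a-time window
-- scan with an in-place marking pass (and a deepcopy of the whole image) per match.

-- shared cell-level primitives (Python's image[r][c] reads and image[r][c] = 'O' writes)
def pvGetRow (im : List (List String)) (i : Int) : List String := (PySem.List.pyGet? im i).getD []
def pvGetCell (im : List (List String)) (r c : Int) : String := (PySem.List.pyGet? (pvGetRow im r) c).getD ""
def pvMonCell (ms : List String) (r c : Int) : Char := (PySem.Str.pyGet? ((PySem.List.pyGet? ms r).getD "") c).getD ' '
def pvSetO (im : List (List String)) (r c : Int) : List (List String) := PySem.List.pySetD im r (PySem.List.pySetD (pvGetRow im r) c "O")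

-- ===== PORT A =====
def pvReplaceHash (monster : List String) (size_hor size_ver : Int) (in_col in_row : Int) (image : List (List String)) : List (List String) :=
  (PySem.List.pyRange in_col (in_col + size_hor) 1).foldl
    (fun ic in_c =>
      (PySem.List.pyRange in_row (in_row + size_ver) 1).foldl
        (fun ic in_r =>
          if pvMonCell monster (in_r - in_row) (in_c - in_col) = '#' then pvSetO ic in_r in_c else ic)
        ic)
    image

def pvMonsterInWindow (monster : List String) (in_window : List (List String)) (in_monster : List String) : Bool :=
  (PySem.List.pyRange 0 (PySem.Str.len ((PySem.List.pyGet? monster 0).getD "")) 1).all fun in_c =>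
    (PySem.List.pyRange 0 (PySem.List.len monster) 1).all fun in_r =>
      if pvMonCell in_monster in_r in_c = '#'
      then pvGetCell in_window in_r in_c == String.ofList [pvMonCell in_monster in_r in_c]
      else true

def find_monster (in_image : List (List String)) (monster : List String) : List (List String) :=
  let size_hor := PySem.Str.len ((PySem.List.pyGet? monster 0).getD "")
  let size_ver := PySem.List.len monster
  (PySem.List.pyRange 0 (PySem.List.len (pvGetRow in_image 0) - size_hor + 1) 1).foldl
    (fun acc col =>
      (PySem.List.pyRange 0 (PySem.List.len in_image - size_ver + 1) 1).foldl
        (fun acc row =>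
          let window := (PySem.List.slice in_image (some row) (some (row + size_ver))).map
              (fun r => PySem.List.slice r (some col) (some (col + size_hor)))
          if pvMonsterInWindow monster window monster then pvReplaceHash monster size_hor size_ver col row acc
          else acc)
        acc)
    in_image

-- ===== PORT B =====
-- req = the column offsets of '#' inside one monster row (its first w characters)
def pvReq (w : Int) (mrow : String) : List Int :=
  ((PySem.Str.slice mrow none (some w)).toList.zipIdx.filter fun p => p.1 == '#').map fun p => ((p.2 : Int))

-- hits(k, mrow) = the set of corners consistent with monster row k alone
def pvHits (in_image : List (List String)) (rows cols h w : Int) (k : Int) (mrow : String) : PySem.Set (Int × Int) :=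
  PySem.Set.ofList ((PySem.List.pyRange 0 (rows - h + 1) 1).flatMap fun r0 =>
    ((PySem.List.pyRange 0 (cols - w + 1) 1).filter fun c0 =>
       (pvReq w mrow).all fun c => pvGetCell in_image (r0 + k) (c0 + c) == "#").map fun c0 => (r0, c0))

-- offs = the monster's '#' cells as (row, col) offsets
def pvOffsets (monster : List String) (w : Int) : List (Int × Int) :=
  monster.zipIdx.flatMap fun rm =>
    ((PySem.Str.slice rm.1 none (some w)).toList.zipIdx.filter fun p => p.1 == '#').map
      fun p => ((rm.2 : Int), (p.2 : Int))

def find_monster_alt (in_image : List (List String)) (monster : List String) : List (List String) :=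
  let h := PySem.List.len monster
  let w := PySem.Str.len ((PySem.List.pyGet? monster 0).getD "")
  let rows := PySem.List.len in_image
  let cols := PySem.List.len (pvGetRow in_image 0)
  let grid : PySem.Set (Int × Int) :=
    PySem.Set.ofList ((PySem.List.pyRange 0 (rows - h + 1) 1).flatMap fun r0 =>
      (PySem.List.pyRange 0 (cols - w + 1) 1).map fun c0 => (r0, c0))
  let corners := monster.zipIdx.foldl
    (fun cs km => PySem.Set.inter cs (pvHits in_image rows cols h w (km.2 : Int) km.1)) grid
  let offs := pvOffsets monster w
  let marked : PySem.Set (Int × Int) :=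
    PySem.Set.ofList (corners.flatMap fun p => offs.map fun q => (p.1 + q.1, p.2 + q.2))
  in_image.zipIdx.map fun ri =>
    ri.1.zipIdx.map fun cj =>
      if PySem.Set.contains marked ((ri.2 : Int), (cj.2 : Int)) then "O" else cj.1

-- ===== PRECONDITION & SPEC =====
-- Pre_ excludes inputs on which A raises IndexError (empty image/monster, ragged rows that the scan indexes past)
-- and, as a stated narrowing, some ragged inputs on which A still returns a value only because its column-major
-- early-exit scan happens to short-circuit before the out-of-range access.
def Pre_find_monster (in_image : List (List String)) (monster : List String) : Prop :=
  monster ≠ [] ∧ in_image ≠ [] ∧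
  (monster.length ≤ in_image.length ∧ (monster.headD "").toList.length ≤ (in_image.headD []).length →
    (∀ m ∈ monster, (monster.headD "").toList.length ≤ m.toList.length) ∧
    ((∃ m ∈ monster, '#' ∈ m.toList.take (monster.headD "").toList.length) →
      ∀ r ∈ in_image, (in_image.headD []).length ≤ r.length))
instance (in_image : List (List String)) (monster : List String) : Decidable (Pre_find_monster in_image monster) := by
  unfold Pre_find_monster; infer_instance

def pvWitness_find_monster : List (List String) × List String := ([["#", "."], [".", "#"]], ["#"])

def Spec_find_monster (in_image : List (List String)) (monster : List String) (out : List (List String)) : Prop := out = find_monster_alt in_image monster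
instance (in_image : List (List String)) (monster : List String) (out : List (List String)) : Decidable (Spec_find_monster in_image monster out) := by unfold Spec_find_monster; infer_instance

-- ===== CLAIM (what is proved, stated in full; the proofs are below) =====
def Claim_equal_find_monster : Prop := ∀ (in_image : List (List String)) (monster : List String), Dom_find_monster in_image monster → Pre_find_monster in_image monster → Spec_find_monster in_image monster (find_monster in_image monster)

-- ===== LEMMAS AND PROOFS =====

-- proof-side normal forms: Nat-indexed constant writes and the column-major relative '#' offsets
def markN (im : List (List String)) (p : Nat × Nat) : List (List String) :=
  im.set p.1 ((im.getD p.1 []).set p.2 "O")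

def posC (monster : List String) : List (Nat × Nat) :=
  (List.range (monster.headD "").toList.length).flatMap fun (c : Nat) =>
    ((List.range monster.length).filter fun (r : Nat) => pvMonCell monster (r : Int) (c : Int) == '#').map fun r => (r, c)

theorem monCell_eq (monster : List String) (r c : Nat) (hr : r < monster.length) :
    pvMonCell monster (r : Int) (c : Int) = (monster[r].toList[c]?).getD ' ' := by
  simp [pvMonCell, PySem.List.pyGet?_natCast, List.getElem?_eq_getElem hr, PySem.Str.pyGet?]

theorem pvSetO_natCast (im : List (List String)) (a b : Nat) :
    pvSetO im (a : Int) (b : Int) = markN im (a, b) := by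
  simp [pvSetO, pvGetRow, markN, PySem.List.pySetD_natCast, PySem.List.pyGet?_natCast,
    List.getD_eq_getElem?_getD]

theorem mem_posC (monster : List String) (p : Nat × Nat) :
    p ∈ posC monster ↔
      p.1 < monster.length ∧ p.2 < (monster.headD "").toList.length ∧ pvMonCell monster (p.1 : Int) (p.2 : Int) = '#' := by
  rcases p with ⟨r, c⟩
  simp [posC, List.mem_flatMap, List.mem_map, List.mem_filter]
  aesop

theorem mem_pvOffsets (monster : List String) (q : Int × Int) :
    q ∈ pvOffsets monster ((monster.headD "").toList.length : Int) ↔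
      ∃ p : Nat × Nat, q = ((p.1 : Int), (p.2 : Int)) ∧ p ∈ posC monster := by
  simp only [pvOffsets, List.mem_flatMap, List.mem_map, List.mem_filter]
  constructor
  · rintro ⟨⟨mrow, r⟩, hmem, ⟨ch, c⟩, ⟨hc, hch⟩, rfl⟩
    rw [List.mk_mem_zipIdx_iff_getElem?] at hmem hc
    simp only [PySem.Str.toList_slice, PySem.Chars.slice_eq_listSlice,
      PySem.List.slice_to_natCast, List.getElem?_take] at hc
    have hr : r < monster.length := by
      by_contra h
      rw [List.getElem?_eq_none (by omega)] at hmem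
      simp at hmem
    have hcw : c < (monster.headD "").toList.length := by
      by_contra h
      rw [if_neg h] at hc
      simp at hc
    rw [if_pos hcw] at hc
    refine ⟨(r, c), rfl, (mem_posC _ _).mpr ⟨hr, hcw, ?_⟩⟩
    rw [monCell_eq _ _ _ hr]
    have : monster[r] = mrow := by simpa [List.getElem?_eq_getElem hr] using hmem
    rw [this, hc]
    simpa using beq_iff_eq.mp hch
  · rintro ⟨⟨r, c⟩, rfl, hp⟩
    rw [mem_posC] at hp
    obtain ⟨hr, hc, hm⟩ := hp
    rw [monCell_eq _ _ _ hr] at hm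
    refine ⟨(monster[r], r), ?_, ⟨('#', c), ⟨?_, by simp⟩, rfl⟩⟩
    · rw [List.mk_mem_zipIdx_iff_getElem?]; simp [List.getElem?_eq_getElem hr]
    · rw [List.mk_mem_zipIdx_iff_getElem?]
      simp only [PySem.Str.toList_slice, PySem.Chars.slice_eq_listSlice,
        PySem.List.slice_to_natCast, List.getElem?_take]
      cases hg : monster[r].toList[c]? with
      | none => simp [hg] at hm
      | some ch =>
          simp only [hg, Option.getD_some] at hm
          have hc2 : c < (monster.head?.getD "").length := by
            simpa [List.headD_eq_head?_getD] using hc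
          simp [hc2, hm]

theorem replace_eq_markFold (monster : List String)
    (colN rowN : Nat) (im : List (List String)) :
    pvReplaceHash monster (((monster.headD "").toList.length : Nat) : Int)
        ((monster.length : Nat) : Int) (colN : Int) (rowN : Int) im
      = ((posC monster).map fun p => (rowN + p.1, colN + p.2)).foldl markN im := by
  unfold pvReplaceHash
  simp only [PySem.List.pyRange_one, add_sub_cancel_left, Int.toNat_natCast, List.foldl_map]
  simp only [← Nat.cast_add, pvSetO_natCast]
  rw [PySem.List.foldl_congr_mem' _ _
    (fun acc (k : Nat) => (((List.range monster.length).filter fun (j : Nat) =>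
        pvMonCell monster (j : Int) (k : Int) == '#').map fun j => (rowN + j, colN + k)).foldl markN acc)
    _ ?_]
  · rw [← List.foldl_flatMap]
    have hlist : ((List.range (monster.headD "").toList.length).flatMap fun (k : Nat) =>
        ((List.range monster.length).filter fun (j : Nat) =>
          pvMonCell monster (j : Int) (k : Int) == '#').map fun j => (rowN + j, colN + k))
        = (posC monster).map fun p => (rowN + p.1, colN + p.2) := by
      simp [posC, List.map_flatMap, List.map_map, Function.comp_def]
    rw [hlist, List.foldl_map]
  · intro k _ acc
    rw [PySem.List.foldl_ite_eq_foldl_filter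
      (p := fun j : Nat => pvMonCell monster (j : Int) (k : Int) = '#')
      (f := fun ic (j : Nat) => markN ic (rowN + j, colN + k))]
    beta_reduce
    conv_rhs => rw [List.foldl_map]
    have hfil : ((List.range monster.length).filter fun (j : Nat) =>
          pvMonCell monster (j : Int) (k : Int) == '#')
        = ((List.range monster.length).filter fun (x : Nat) =>
          decide (pvMonCell monster (x : Int) (k : Int) = '#')) := by
      apply List.filter_congr
      intro j _
      cases hd : decide (pvMonCell monster (j : Int) (k : Int) = '#') <;> simp_all
    rw [hfil]

theorem window_cell (in_image : List (List String)) (wN hN rowN colN j k : Nat)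
    (hj : j < hN) (hk : k < wN)
    (hrow : rowN + j < in_image.length)
    (hcol : ∀ r ∈ in_image, colN + k < r.length) :
    pvGetCell
        ((PySem.List.slice in_image (some (rowN : Int)) (some ((rowN : Int) + (hN : Int)))).map
          fun r => PySem.List.slice r (some (colN : Int)) (some ((colN : Int) + (wN : Int))))
        (j : Int) (k : Int)
      = pvGetCell in_image ((rowN : Int) + (j : Int)) ((colN : Int) + (k : Int)) := by
  have hck : colN + k < in_image[rowN + j].length := hcol _ (List.getElem_mem hrow)
  have hr2 : (rowN : Int) + (j : Int) = ((rowN + j : Nat) : Int) := by push_cast; ring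
  have hc2 : (colN : Int) + (k : Int) = ((colN + k : Nat) : Int) := by push_cast; ring
  rw [PySem.List.slice_natCast_add, hr2, hc2]
  simp only [pvGetCell, pvGetRow, PySem.List.pyGet?_natCast]
  rw [List.getElem?_map, List.getElem?_take, if_pos hj, List.getElem?_drop,
    List.getElem?_eq_getElem hrow]
  simp only [Option.map_some, Option.getD_some]
  rw [PySem.List.slice_natCast_add, List.getElem?_take, if_pos hk, List.getElem?_drop,
    List.getElem?_eq_getElem hck]

theorem found_eq (in_image : List (List String)) (monster : List String)
    (hne : monster ≠ []) (rowN colN : Nat)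
    (hfit : monster.length + rowN ≤ in_image.length)
    (himg : (∃ m ∈ monster, '#' ∈ m.toList.take (monster.headD "").toList.length) →
      ∀ r ∈ in_image, (in_image.headD []).length ≤ r.length)
    (hcw : colN + (monster.headD "").toList.length ≤ (in_image.headD []).length) :
    pvMonsterInWindow monster
        ((PySem.List.slice in_image (some (rowN : Int)) (some ((rowN : Int) + (monster.length : Int)))).map
          fun r => PySem.List.slice r (some (colN : Int))
            (some ((colN : Int) + ((monster.headD "").toList.length : Int))))
        monster
      = (pvOffsets monster ((monster.headD "").toList.length : Int)).all
          (fun rc => pvGetCell in_image ((rowN : Int) + rc.1) ((colN : Int) + rc.2) == "#") := by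
  have hw : PySem.Str.len ((PySem.List.pyGet? monster 0).getD "") = ((monster.headD "").toList.length : Int) := by
    cases monster with
    | nil => simp [PySem.List.pyGet?]
    | cons a t => rw [PySem.List.pyGet?_zero_cons]; simp [PySem.Str.len_eq]
  unfold pvMonsterInWindow
  rw [hw, PySem.List.len_eq]
  rw [Bool.eq_iff_iff]
  simp only [List.all_eq_true, PySem.List.pyRange_zero_natCast]
  constructor
  · intro hL rc hrc
    obtain ⟨p, rfl, hp⟩ := (mem_pvOffsets monster rc).mp hrc
    obtain ⟨hr, hc, hm⟩ := (mem_posC monster p).mp hp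
    have hget : monster[p.1].toList[p.2]? = some '#' := by
      rw [monCell_eq _ _ _ hr] at hm
      cases hg : monster[p.1].toList[p.2]? with
      | none => rw [hg] at hm; simp at hm
      | some ch => rw [hg] at hm; simp at hm; rw [hm]
    have hhash : ∃ m ∈ monster, '#' ∈ m.toList.take (monster.headD "").toList.length :=
      ⟨monster[p.1], List.getElem_mem hr,
        List.mem_iff_getElem?.mpr ⟨p.2, by rw [List.getElem?_take, if_pos hc, hget]⟩⟩
    have hcol : ∀ r ∈ in_image, colN + p.2 < r.length := fun r hr' => by
      have := himg hhash r hr'; omega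
    have hwc := window_cell in_image (monster.headD "").toList.length monster.length rowN colN
      p.1 p.2 hr hc (by omega) hcol
    have h1 := hL ((p.2 : Nat) : Int) (List.mem_map.mpr ⟨p.2, List.mem_range.mpr hc, rfl⟩)
    have h2 := h1 ((p.1 : Nat) : Int) (List.mem_map.mpr ⟨p.1, List.mem_range.mpr hr, rfl⟩)
    rw [if_pos hm, hm] at h2
    rw [← hwc]
    exact h2
  · intro hR x hx
    obtain ⟨c, hcmem, rfl⟩ := List.mem_map.mp hx
    intro y hy
    obtain ⟨r, hrmem, rfl⟩ := List.mem_map.mp hy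
    have hc := List.mem_range.mp hcmem
    have hr := List.mem_range.mp hrmem
    by_cases hm : pvMonCell monster (r : Int) (c : Int) = '#'
    · rw [if_pos hm, hm]
      have hmem : ((r : Int), (c : Int)) ∈ pvOffsets monster ((monster.headD "").toList.length : Int) :=
        (mem_pvOffsets monster _).mpr ⟨(r, c), rfl, (mem_posC monster (r, c)).mpr ⟨hr, hc, hm⟩⟩
      have h2 := hR _ hmem
      have hget : monster[r].toList[c]? = some '#' := by
        rw [monCell_eq _ _ _ hr] at hm
        cases hg : monster[r].toList[c]? with
        | none => rw [hg] at hm; simp at hm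
        | some ch => rw [hg] at hm; simp at hm; rw [hm]
      have hhash : ∃ m ∈ monster, '#' ∈ m.toList.take (monster.headD "").toList.length :=
        ⟨monster[r], List.getElem_mem hr,
          List.mem_iff_getElem?.mpr ⟨c, by rw [List.getElem?_take, if_pos hc, hget]⟩⟩
      have hcol : ∀ rw ∈ in_image, colN + c < rw.length := fun rw hrw => by
        have := himg hhash rw hrw; omega
      have hwc := window_cell in_image (monster.headD "").toList.length monster.length rowN colN
        r c hr hc (by omega) hcol
      rw [hwc]
      exact h2
    · rw [if_neg hm]

-- ---- phase 2 normal form: a fold of constant writes IS a per-cell functional rebuild ----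

def cellOf (im : List (List String)) (i j : Nat) : Option String := im[i]?.bind (·[j]?)

theorem cell_markN (im : List (List String)) (p : Nat × Nat) (i j : Nat) :
    cellOf (markN im p) i j = (cellOf im i j).map (fun s => if p = (i, j) then "O" else s) := by
  rcases p with ⟨a, b⟩
  unfold cellOf markN
  by_cases ha : a = i
  · subst ha
    by_cases hlen : a < im.length
    · have h1 : (im.set a ((im.getD a []).set b "O"))[a]? = some (im[a].set b "O") := by
        simp [List.getElem?_set, hlen, List.getD_eq_getElem?_getD, List.getElem?_eq_getElem hlen]
      rw [h1]
      simp only [Option.bind_some]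
      by_cases hb : b = j
      · subst hb
        by_cases hbl : b < im[a].length
        · simp [List.getElem?_set, hbl, List.getElem?_eq_getElem hbl,
            List.getElem?_eq_getElem hlen]
        · simp [List.getElem?_set, hbl, List.getElem?_eq_none (by omega : im[a].length ≤ b),
            List.getElem?_eq_getElem hlen]
      · simp [List.getElem?_set, hb, Prod.ext_iff, List.getElem?_eq_getElem hlen]
    · rw [List.set_eq_of_length_le (by omega)]
      rw [List.getElem?_eq_none (by omega : im.length ≤ a)]
      simp
  · rw [List.getElem?_set_ne ha]
    cases him : im[i]? with
    | none => simp
    | some row =>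
        simp only [Option.bind_some, Option.map]
        cases hrj : row[j]? with
        | none => simp
        | some s => simp [Prod.ext_iff, ha]

theorem cell_foldMark (L : List (Nat × Nat)) (im : List (List String)) (i j : Nat) :
    cellOf (L.foldl markN im) i j = (cellOf im i j).map (fun s => if (i, j) ∈ L then "O" else s) := by
  induction L generalizing im with
  | nil => cases h : cellOf im i j <;> simp [h]
  | cons p L ih =>
      rw [List.foldl_cons, ih, cell_markN, Option.map_map]
      congr 1
      funext s
      by_cases hp : p = (i, j) <;> by_cases hL : (i, j) ∈ L <;>
        simp [hp, hL, List.mem_cons, Function.comp, eq_comm]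

theorem row_markN (im : List (List String)) (p : Nat × Nat) (i : Nat) :
    ((markN im p)[i]?).map List.length = (im[i]?).map List.length := by
  rcases p with ⟨a, b⟩
  unfold markN
  by_cases ha : a = i
  · subst ha
    by_cases hlen : a < im.length
    · rw [List.getElem?_set]
      simp [hlen, List.getElem?_eq_getElem hlen, List.getD_eq_getElem?_getD,
        List.getElem?_eq_getElem hlen]
    · rw [List.set_eq_of_length_le (by omega)]
  · rw [List.getElem?_set_ne ha]

theorem rowlen_foldMark (L : List (Nat × Nat)) (im : List (List String)) (i : Nat) :
    ((L.foldl markN im)[i]?).map List.length = (im[i]?).map List.length := by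
  induction L generalizing im with
  | nil => rfl
  | cons p L ih => rw [List.foldl_cons, ih, row_markN]

theorem foldMark_eq_map (L : List (Nat × Nat)) (im : List (List String)) :
    L.foldl markN im
      = im.zipIdx.map (fun ri => ri.1.zipIdx.map (fun cj => if (ri.2, cj.2) ∈ L then "O" else cj.1)) := by
  apply List.ext_getElem?
  intro i
  rw [List.getElem?_map, List.getElem?_zipIdx]
  have hrl := rowlen_foldMark L im i
  cases him : im[i]? with
  | none =>
      rw [him] at hrl
      simp only [Option.map_none]
      cases hfi : (L.foldl markN im)[i]? with
      | none => rfl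
      | some r => rw [hfi] at hrl; simp at hrl
  | some row =>
      rw [him] at hrl
      cases hfi : (L.foldl markN im)[i]? with
      | none => rw [hfi] at hrl; simp at hrl
      | some row' =>
          rw [hfi] at hrl
          simp only [Option.map_some, Option.some.injEq] at hrl ⊢
          apply List.ext_getElem?
          intro j
          have hc := cell_foldMark L im i j
          rw [List.getElem?_map, List.getElem?_zipIdx]
          unfold cellOf at hc
          rw [hfi, him] at hc
          simp only [Option.bind_some] at hc
          rw [hc]
          cases hrj : row[j]? <;> simp

-- ---- B-side membership characterisations ----

theorem mem_foldl_inter {α : Type} [BEq α] [LawfulBEq α] {β : Type} (l : List β)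
    (f : β → PySem.Set α) (init : PySem.Set α) (x : α) :
    x ∈ l.foldl (fun cs km => PySem.Set.inter cs (f km)) init ↔ x ∈ init ∧ ∀ b ∈ l, x ∈ f b := by
  induction l generalizing init with
  | nil => simp
  | cons b l ih =>
      rw [List.foldl_cons, ih, PySem.Set.mem_inter]
      constructor
      · rintro ⟨⟨h1, h2⟩, h3⟩
        refine ⟨h1, fun c hc => ?_⟩
        rcases List.mem_cons.mp hc with rfl | hc'
        · exact h2
        · exact h3 c hc'
      · rintro ⟨h1, h2⟩
        exact ⟨⟨h1, h2 b (List.mem_cons_self)⟩, fun c hc => h2 c (List.mem_cons_of_mem _ hc)⟩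

theorem mem_pvReq (monster : List String) (kN : Nat) (hk : kN < monster.length) (c : Int) :
    c ∈ pvReq ((monster.headD "").toList.length : Int) monster[kN] ↔
      ∃ cN : Nat, c = (cN : Int) ∧ (kN, cN) ∈ posC monster := by
  unfold pvReq
  simp only [List.mem_map, List.mem_filter]
  constructor
  · rintro ⟨⟨ch, cN⟩, ⟨hc, hch⟩, rfl⟩
    rw [List.mk_mem_zipIdx_iff_getElem?] at hc
    simp only [PySem.Str.toList_slice, PySem.Chars.slice_eq_listSlice,
      PySem.List.slice_to_natCast, List.getElem?_take] at hc
    have hcw : cN < (monster.headD "").toList.length := by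
      by_contra h; rw [if_neg h] at hc; simp at hc
    rw [if_pos hcw] at hc
    refine ⟨cN, rfl, (mem_posC _ _).mpr ⟨hk, hcw, ?_⟩⟩
    rw [monCell_eq _ _ _ hk, hc]
    simpa using beq_iff_eq.mp hch
  · rintro ⟨cN, rfl, hp⟩
    obtain ⟨-, hcw, hm⟩ := (mem_posC _ _).mp hp
    rw [monCell_eq _ _ _ hk] at hm
    refine ⟨('#', cN), ⟨?_, by simp⟩, rfl⟩
    rw [List.mk_mem_zipIdx_iff_getElem?]
    simp only [PySem.Str.toList_slice, PySem.Chars.slice_eq_listSlice,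
      PySem.List.slice_to_natCast, List.getElem?_take, if_pos hcw]
    cases hg : monster[kN].toList[cN]? with
    | none => simp [hg] at hm
    | some ch => simp only [hg, Option.getD_some] at hm; rw [hm]

theorem mem_pvHits (in_image : List (List String)) (monster : List String)
    (kN : Nat) (hk : kN < monster.length) (x : Int × Int) :
    x ∈ pvHits in_image (in_image.length : Int) ((in_image.headD []).length : Int)
        (monster.length : Int) ((monster.headD "").toList.length : Int) (kN : Int) monster[kN] ↔
      ∃ rn cn : Nat, x = ((rn : Int), (cn : Int)) ∧
        (rn : Int) < (in_image.length : Int) - (monster.length : Int) + 1 ∧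
        (cn : Int) < ((in_image.headD []).length : Int) - ((monster.headD "").toList.length : Int) + 1 ∧
        ∀ cN : Nat, (kN, cN) ∈ posC monster →
          pvGetCell in_image ((rn : Int) + (kN : Int)) ((cn : Int) + (cN : Int)) == "#" := by
  unfold pvHits
  rw [PySem.Set.mem_ofList]
  simp only [List.mem_flatMap, List.mem_map, List.mem_filter, PySem.List.mem_pyRange_one]
  constructor
  · rintro ⟨r0, ⟨hr1, hr2⟩, c0, ⟨⟨hc1, hc2⟩, hall⟩, rfl⟩
    refine ⟨r0.toNat, c0.toNat, by simp [Int.toNat_of_nonneg hr1, Int.toNat_of_nonneg hc1], ?_, ?_, ?_⟩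
    · omega
    · omega
    · intro cN hp
      have hreq := (mem_pvReq monster kN hk (cN : Int)).mpr ⟨cN, rfl, hp⟩
      have := (List.all_eq_true.mp hall) _ hreq
      simpa [Int.toNat_of_nonneg hr1, Int.toNat_of_nonneg hc1] using this
  · rintro ⟨rn, cn, rfl, hr, hc, hall⟩
    refine ⟨(rn : Int), ⟨by omega, hr⟩, (cn : Int), ⟨⟨by omega, hc⟩, ?_⟩, rfl⟩
    rw [List.all_eq_true]
    intro c hcreq
    obtain ⟨cN, rfl, hp⟩ := (mem_pvReq monster kN hk c).mp hcreq
    exact hall cN hp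

-- ---- the common normal form both programs are reduced to ----

def natCorners (im : List (List String)) (monster : List String) : List (Nat × Nat) :=
  (List.range ((im.headD []).length - (monster.headD "").toList.length + 1)).flatMap fun (c : Nat) =>
    ((List.range (im.length - monster.length + 1)).filter fun (r : Nat) =>
      (pvOffsets monster ((monster.headD "").toList.length : Int)).all fun rc =>
        pvGetCell im ((r : Int) + rc.1) ((c : Int) + rc.2) == "#").map fun r => (r, c)

def marksA (im : List (List String)) (monster : List String) : List (Nat × Nat) :=
  (natCorners im monster).flatMap fun p => (posC monster).map fun q => (p.1 + q.1, p.2 + q.2)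

theorem mem_natCorners (im : List (List String)) (monster : List String) (p : Nat × Nat) :
    p ∈ natCorners im monster ↔
      p.1 < im.length - monster.length + 1 ∧
      p.2 < (im.headD []).length - (monster.headD "").toList.length + 1 ∧
      ∀ rc ∈ pvOffsets monster ((monster.headD "").toList.length : Int),
        pvGetCell im ((p.1 : Int) + rc.1) ((p.2 : Int) + rc.2) == "#" := by
  rcases p with ⟨r, c⟩
  simp [natCorners, List.mem_flatMap, List.mem_map, List.mem_filter, List.all_eq_true]
  aesop

theorem hw_len (monster : List String) :
    PySem.Str.len ((PySem.List.pyGet? monster 0).getD "") = ((monster.headD "").toList.length : Int) := by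
  cases monster with
  | nil => simp [PySem.List.pyGet?]
  | cons a t => rw [PySem.List.pyGet?_zero_cons]; simp [PySem.Str.len_eq]

theorem hrow0_eq (in_image : List (List String)) : pvGetRow in_image 0 = in_image.headD [] := by
  cases in_image with
  | nil => simp [pvGetRow, PySem.List.pyGet?]
  | cons a t => simp [pvGetRow]

-- A, when the monster fits, is a fold of constant writes over the covered coordinates
theorem A_eq_fit (in_image : List (List String)) (monster : List String)
    (hmne : monster ≠ [])
    (hhl : monster.length ≤ in_image.length)
    (hwl : (monster.headD "").toList.length ≤ (in_image.headD []).length)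
    (himg : (∃ m ∈ monster, '#' ∈ m.toList.take (monster.headD "").toList.length) →
      ∀ r ∈ in_image, (in_image.headD []).length ≤ r.length) :
    find_monster in_image monster = (marksA in_image monster).foldl markN in_image := by
  simp only [find_monster, hw_len, hrow0_eq, PySem.List.len_eq]
  have hC : ((in_image.headD []).length : Int) - ((monster.headD "").toList.length : Int) + 1
      = (((in_image.headD []).length - (monster.headD "").toList.length + 1 : Nat) : Int) := by
    push_cast; omega
  have hR : (in_image.length : Int) - (monster.length : Int) + 1
      = ((in_image.length - monster.length + 1 : Nat) : Int) := by
    push_cast; omega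
  rw [hC, hR]
  simp only [PySem.List.pyRange_zero_natCast, List.foldl_map]
  rw [PySem.List.foldl_congr_mem' _ _
    (fun acc (c : Nat) =>
      ((((List.range (in_image.length - monster.length + 1)).filter fun (r : Nat) =>
          (pvOffsets monster ((monster.headD "").toList.length : Int)).all fun rc =>
            pvGetCell in_image (((r : Nat) : Int) + rc.1) (((c : Nat) : Int) + rc.2) == "#").map
        fun r => (r, c)).foldl
        (fun acc (p : Nat × Nat) =>
          ((posC monster).map fun q => (p.1 + q.1, p.2 + q.2)).foldl markN acc) acc))
    _ ?_]
  · rw [← List.foldl_flatMap, ← List.foldl_flatMap]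
    rfl
  · intro c hc acc
    beta_reduce
    have hcC := List.mem_range.mp hc
    rw [PySem.List.foldl_congr_mem' _ _
      (fun x (y : Nat) =>
        if ((pvOffsets monster ((monster.headD "").toList.length : Int)).all fun rc =>
            pvGetCell in_image ((y : Int) + rc.1) ((c : Int) + rc.2) == "#") = true
        then ((posC monster).map fun q => (y + q.1, c + q.2)).foldl markN x else x)
      _ ?_]
    · rw [PySem.List.foldl_ite_eq_foldl_filter
        (p := fun y : Nat => ((pvOffsets monster ((monster.headD "").toList.length : Int)).all fun rc =>
            pvGetCell in_image ((y : Int) + rc.1) ((c : Int) + rc.2) == "#") = true)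
        (f := fun x (y : Nat) => ((posC monster).map fun q => (y + q.1, c + q.2)).foldl markN x)]
      have hfil : (List.filter
            (fun y : Nat => decide (((pvOffsets monster ((monster.headD "").toList.length : Int)).all fun rc =>
              pvGetCell in_image ((y : Int) + rc.1) ((c : Int) + rc.2) == "#") = true))
            (List.range (in_image.length - monster.length + 1)))
          = (List.filter
            (fun r : Nat => (pvOffsets monster ((monster.headD "").toList.length : Int)).all fun rc =>
              pvGetCell in_image ((r : Int) + rc.1) ((c : Int) + rc.2) == "#")
            (List.range (in_image.length - monster.length + 1))) :=
        List.filter_congr (fun r _ => by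
          cases h : ((pvOffsets monster ((monster.headD "").toList.length : Int)).all fun rc =>
              pvGetCell in_image ((r : Int) + rc.1) ((c : Int) + rc.2) == "#") <;> simp_all)
      rw [hfil]
      conv_rhs => rw [List.foldl_map]
    · intro r hr x
      have hrR := List.mem_range.mp hr
      rw [found_eq in_image monster hmne r c (by omega) himg (by omega),
        replace_eq_markFold monster c r]

-- A, when the monster does not fit, returns the image unchanged
theorem A_eq_nonfit (in_image : List (List String)) (monster : List String)
    (hnf : ¬(monster.length ≤ in_image.length ∧ (monster.headD "").toList.length ≤ (in_image.headD []).length)) :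
    find_monster in_image monster = in_image := by
  simp only [find_monster, hw_len, hrow0_eq, PySem.List.len_eq]
  rcases not_and_or.mp hnf with hbad | hbad
  · rw [PySem.List.pyRange_one_eq_nil
      (a := 0) (b := (in_image.length : Int) - (monster.length : Int) + 1) (by omega)]
    simp
  · rw [PySem.List.pyRange_one_eq_nil
      (a := 0) (b := ((in_image.headD []).length : Int) - ((monster.headD "").toList.length : Int) + 1)
      (by omega)]
    simp

-- B unfolds to the per-cell rebuild over its marked-coordinate list
theorem B_eq_map (in_image : List (List String)) (monster : List String) :
    find_monster_alt in_image monster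
      = in_image.zipIdx.map fun ri =>
          ri.1.zipIdx.map fun cj =>
            if ((ri.2 : Int), (cj.2 : Int)) ∈
                ((monster.zipIdx.foldl
                    (fun cs km => PySem.Set.inter cs
                      (pvHits in_image (in_image.length : Int) ((in_image.headD []).length : Int)
                        (monster.length : Int) ((monster.headD "").toList.length : Int) (km.2 : Int) km.1))
                    (PySem.Set.ofList ((PySem.List.pyRange 0 ((in_image.length : Int) - (monster.length : Int) + 1) 1).flatMap fun r0 =>
                      (PySem.List.pyRange 0 (((in_image.headD []).length : Int) - ((monster.headD "").toList.length : Int) + 1) 1).map fun c0 => (r0, c0)))).flatMap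
                  fun p => (pvOffsets monster ((monster.headD "").toList.length : Int)).map fun q => (p.1 + q.1, p.2 + q.2))
            then "O" else cj.1 := by
  simp only [find_monster_alt, hw_len, hrow0_eq, PySem.List.len_eq,
    PySem.Set.contains_iff, PySem.Set.mem_ofList]

-- the per-cell rebuild with an unsatisfied condition is the identity
theorem rebuild_id (im : List (List String)) :
    (im.zipIdx.map fun ri => ri.1.zipIdx.map fun cj => cj.1) = im := by
  have h : ∀ row : List String, (row.zipIdx.map fun cj : String × Nat => cj.1) = row := by
    intro row
    simpa using List.zipIdx_map_fst (l := row)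
  calc (im.zipIdx.map fun ri => ri.1.zipIdx.map fun cj => cj.1)
      = im.zipIdx.map (fun ri => ri.1) := List.map_congr_left (fun ri _ => h ri.1)
    _ = im := by simpa using List.zipIdx_map_fst (l := im)

-- a rebuild whose condition never holds is the identity
theorem rebuild_of_notmem (im : List (List String)) (L : List (Int × Int))
    (h : ∀ x : Int × Int, ¬(x ∈ L)) :
    (im.zipIdx.map fun ri => ri.1.zipIdx.map fun cj =>
        if ((ri.2 : Int), (cj.2 : Int)) ∈ L then "O" else cj.1) = im := by
  calc (im.zipIdx.map fun ri => ri.1.zipIdx.map fun cj =>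
          if ((ri.2 : Int), (cj.2 : Int)) ∈ L then "O" else cj.1)
      = im.zipIdx.map fun ri => ri.1.zipIdx.map fun cj => cj.1 :=
        List.map_congr_left (fun ri _ =>
          List.map_congr_left (fun cj _ => if_neg (h _)))
    _ = im := rebuild_id im

-- membership in the corner set B intersects, under a fitting monster
theorem mem_bCorners (in_image : List (List String)) (monster : List String)
    (hhl : monster.length ≤ in_image.length)
    (hwl : (monster.headD "").toList.length ≤ (in_image.headD []).length)
    (x : Int × Int) :
    x ∈ (monster.zipIdx.foldl
        (fun cs km => PySem.Set.inter cs
          (pvHits in_image (in_image.length : Int) ((in_image.headD []).length : Int)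
            (monster.length : Int) ((monster.headD "").toList.length : Int) (km.2 : Int) km.1))
        (PySem.Set.ofList ((PySem.List.pyRange 0 ((in_image.length : Int) - (monster.length : Int) + 1) 1).flatMap fun r0 =>
          (PySem.List.pyRange 0 (((in_image.headD []).length : Int) - ((monster.headD "").toList.length : Int) + 1) 1).map fun c0 => (r0, c0)))) ↔
      ∃ p : Nat × Nat, x = ((p.1 : Int), (p.2 : Int)) ∧ p ∈ natCorners in_image monster := by
  rw [mem_foldl_inter]
  constructor
  · rintro ⟨hgrid, hall⟩
    rw [PySem.Set.mem_ofList] at hgrid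
    simp only [List.mem_flatMap, List.mem_map, PySem.List.mem_pyRange_one] at hgrid
    obtain ⟨r0, ⟨hr1, hr2⟩, c0, ⟨hc1, hc2⟩, rfl⟩ := hgrid
    refine ⟨(r0.toNat, c0.toNat), by simp [Int.toNat_of_nonneg hr1, Int.toNat_of_nonneg hc1], ?_⟩
    rw [mem_natCorners]
    refine ⟨by omega, by omega, ?_⟩
    intro rc hrc
    obtain ⟨⟨kN, cN⟩, rfl, hp⟩ := (mem_pvOffsets monster rc).mp hrc
    have hk : kN < monster.length := ((mem_posC monster _).mp hp).1
    have hkm : (monster[kN], kN) ∈ monster.zipIdx := by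
      rw [List.mk_mem_zipIdx_iff_getElem?]; simp [List.getElem?_eq_getElem hk]
    have hx := hall _ hkm
    rw [mem_pvHits in_image monster kN hk] at hx
    obtain ⟨rn, cn, hcast, -, -, hcell⟩ := hx
    have hrn : rn = r0.toNat := by
      have := congrArg Prod.fst hcast; simp at this; omega
    have hcn : cn = c0.toNat := by
      have := congrArg Prod.snd hcast; simp at this; omega
    subst hrn hcn
    have := hcell cN hp
    simpa [Int.toNat_of_nonneg hr1, Int.toNat_of_nonneg hc1] using this
  · rintro ⟨⟨rn, cn⟩, rfl, hp⟩
    rw [mem_natCorners] at hp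
    obtain ⟨hr, hc, hcond⟩ := hp
    constructor
    · rw [PySem.Set.mem_ofList]
      simp only [List.mem_flatMap, List.mem_map, PySem.List.mem_pyRange_one]
      exact ⟨(rn : Int), ⟨by omega, by omega⟩, (cn : Int), ⟨by omega, by omega⟩, rfl⟩
    · rintro ⟨mrow, kN⟩ hkm
      rw [List.mk_mem_zipIdx_iff_getElem?] at hkm
      have hk : kN < monster.length := by
        by_contra h
        rw [List.getElem?_eq_none (by omega)] at hkm
        simp at hkm
      have hmrow : mrow = monster[kN] := by
        simpa [List.getElem?_eq_getElem hk] using hkm.symm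
      subst hmrow
      rw [mem_pvHits in_image monster kN hk]
      refine ⟨rn, cn, rfl, by omega, by omega, ?_⟩
      intro cN hpc
      exact hcond _ ((mem_pvOffsets monster _).mpr ⟨(kN, cN), rfl, hpc⟩)

-- under a fitting monster, B's marked set and A's write list cover the same coordinates
theorem mem_marked_iff (in_image : List (List String)) (monster : List String)
    (hhl : monster.length ≤ in_image.length)
    (hwl : (monster.headD "").toList.length ≤ (in_image.headD []).length)
    (i j : Nat) :
    (((i : Int), (j : Int)) ∈
        ((monster.zipIdx.foldl
            (fun cs km => PySem.Set.inter cs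
              (pvHits in_image (in_image.length : Int) ((in_image.headD []).length : Int)
                (monster.length : Int) ((monster.headD "").toList.length : Int) (km.2 : Int) km.1))
            (PySem.Set.ofList ((PySem.List.pyRange 0 ((in_image.length : Int) - (monster.length : Int) + 1) 1).flatMap fun r0 =>
              (PySem.List.pyRange 0 (((in_image.headD []).length : Int) - ((monster.headD "").toList.length : Int) + 1) 1).map fun c0 => (r0, c0)))).flatMap
          fun p => (pvOffsets monster ((monster.headD "").toList.length : Int)).map fun q => (p.1 + q.1, p.2 + q.2)))
      ↔ (i, j) ∈ marksA in_image monster := by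
  simp only [List.mem_flatMap, List.mem_map]
  constructor
  · rintro ⟨p, hp, q, hq, heq⟩
    obtain ⟨pn, rfl, hpn⟩ := (mem_bCorners in_image monster hhl hwl p).mp hp
    obtain ⟨qn, rfl, hqn⟩ := (mem_pvOffsets monster q).mp hq
    have h1 : i = pn.1 + qn.1 := by
      have := congrArg Prod.fst heq; simp at this; omega
    have h2 : j = pn.2 + qn.2 := by
      have := congrArg Prod.snd heq; simp at this; omega
    unfold marksA
    simp only [List.mem_flatMap, List.mem_map]
    exact ⟨pn, hpn, qn, hqn, by rw [h1, h2]⟩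
  · intro h
    unfold marksA at h
    simp only [List.mem_flatMap, List.mem_map] at h
    obtain ⟨pn, hpn, qn, hqn, heq⟩ := h
    refine ⟨((pn.1 : Int), (pn.2 : Int)),
      (mem_bCorners in_image monster hhl hwl _).mpr ⟨pn, rfl, hpn⟩,
      ((qn.1 : Int), (qn.2 : Int)), (mem_pvOffsets monster _).mpr ⟨qn, rfl, hqn⟩, ?_⟩
    have h1 : i = pn.1 + qn.1 := by
      have := congrArg Prod.fst heq; simp at this; omega
    have h2 : j = pn.2 + qn.2 := by
      have := congrArg Prod.snd heq; simp at this; omega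
    subst h1 h2
    simp

-- when the monster does not fit, B's corner grid is empty, so nothing is marked
theorem marked_empty_nonfit (in_image : List (List String)) (monster : List String)
    (hnf : ¬(monster.length ≤ in_image.length ∧ (monster.headD "").toList.length ≤ (in_image.headD []).length))
    (x : Int × Int) :
    ¬(x ∈ ((monster.zipIdx.foldl
        (fun cs km => PySem.Set.inter cs
          (pvHits in_image (in_image.length : Int) ((in_image.headD []).length : Int)
            (monster.length : Int) ((monster.headD "").toList.length : Int) (km.2 : Int) km.1))
        (PySem.Set.ofList ((PySem.List.pyRange 0 ((in_image.length : Int) - (monster.length : Int) + 1) 1).flatMap fun r0 =>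
          (PySem.List.pyRange 0 (((in_image.headD []).length : Int) - ((monster.headD "").toList.length : Int) + 1) 1).map fun c0 => (r0, c0)))).flatMap
      fun p => (pvOffsets monster ((monster.headD "").toList.length : Int)).map fun q => (p.1 + q.1, p.2 + q.2))) := by
  simp only [List.mem_flatMap, List.mem_map]
  rintro ⟨p, hp, -⟩
  have := ((mem_foldl_inter _ _ _ _).mp hp).1
  rw [PySem.Set.mem_ofList] at this
  simp only [List.mem_flatMap, List.mem_map, PySem.List.mem_pyRange_one] at this
  obtain ⟨r0, ⟨hr1, hr2⟩, c0, ⟨hc1, hc2⟩, -⟩ := this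
  omega

-- ===== VERDICT (by name: the statement is the Claim_ definition above) =====
theorem find_monster_spec : Claim_equal_find_monster := by
  intro in_image monster _dom hpre
  obtain ⟨hmne, hine, hcond⟩ := hpre
  unfold Spec_find_monster
  rw [B_eq_map]
  by_cases hfit : monster.length ≤ in_image.length ∧
      (monster.headD "").toList.length ≤ (in_image.headD []).length
  · obtain ⟨hhl, hwl⟩ := hfit
    obtain ⟨-, himg⟩ := hcond ⟨hhl, hwl⟩
    rw [A_eq_fit in_image monster hmne hhl hwl himg, foldMark_eq_map]
    apply List.map_congr_left
    rintro ⟨row, i⟩ -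
    apply List.map_congr_left
    rintro ⟨s, j⟩ -
    exact if_congr (mem_marked_iff in_image monster hhl hwl i j).symm rfl rfl
  · rw [A_eq_nonfit in_image monster hfit]
    exact (rebuild_of_notmem in_image _ (marked_empty_nonfit in_image monster hfit)).symm
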